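-- pv_equiv track=rewrite | github.com/Aharvey35/netassist | modules/meraki/actions/org_select.py | _filter_sort
-- ===== SOURCE A (Python) =====
-- def _score(name: str, q: str) -> int:
--     n = (name or "").lower()
--     q = (q or "").lower()
--     if not q: return 0
--     if n == q: return 1000
--     if n.startswith(q): return 900
--     if q in n: return 500
--     return 0
--
-- def _filter_sort(items, key, q):
--     if not q:
--         return list(items)
--     scored = []
--     for it in items:
--         name = str(it.get(key, ""))
--         s = _score(name, q)
--         if s > 0:
--             scored.append((s, name, it))
--     scored.sort(key=lambda t: (-t[0], t[1]))
--     return [it for _, __, it in scored]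
-- ===== SOURCE B (Python) =====
-- def _filter_sort(items, key, q):
--     if not q:
--         return list(items)
--     ql = q.lower()
--     exact, prefix, sub = [], [], []
--     for it in items:
--         name = str(it.get(key, ""))
--         n = name.lower()
--         if n == ql:
--             exact.append((name, it))
--         elif n.startswith(ql):
--             prefix.append((name, it))
--         elif ql in n:
--             sub.append((name, it))
--     out = []
--     for bucket in (exact, prefix, sub):
--         bucket.sort(key=lambda t: t[0])
--         out.extend(it for _, it in bucket)
--     return out
-- ===== Notes on version B (the rewrite author's own statement) =====
-- stated objective: faster
-- what changed: B replaces A's single stable sort under the tuple key (-score, name) by a one-pass three-way bucket partition (exact / prefix / substring match), then stably sorts each bucket by name alone and concatenates the buckets in descending score order.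
import Mathlib
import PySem

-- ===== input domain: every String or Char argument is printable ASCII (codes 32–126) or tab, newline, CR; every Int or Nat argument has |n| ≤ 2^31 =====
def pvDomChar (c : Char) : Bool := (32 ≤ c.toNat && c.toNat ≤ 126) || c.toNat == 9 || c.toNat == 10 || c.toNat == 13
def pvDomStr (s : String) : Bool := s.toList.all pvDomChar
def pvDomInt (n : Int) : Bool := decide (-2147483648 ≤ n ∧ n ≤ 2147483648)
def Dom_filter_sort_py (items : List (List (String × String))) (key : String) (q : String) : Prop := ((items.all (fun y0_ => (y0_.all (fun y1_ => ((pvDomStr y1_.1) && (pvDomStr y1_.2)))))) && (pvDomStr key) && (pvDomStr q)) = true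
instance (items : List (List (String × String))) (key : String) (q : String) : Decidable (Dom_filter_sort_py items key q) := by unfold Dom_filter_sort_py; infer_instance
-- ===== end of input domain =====

-- B replaces A's single stable sort under the tuple key (-score, name) by a one-pass three-way
-- bucket partition (exact / prefix / substring match), each bucket stably sorted by name alone,
-- concatenated in descending score order; same return value (objective: faster, measured).

-- ===== PORT A =====
-- port of _score (name, q are strings; 'name or ""' / 'q or ""' is the identity on strings)
def scorePy (name : String) (q : String) : Int :=
  let n := PySem.Str.lower name
  let ql := PySem.Str.lower q
  if ql = "" then 0
  else if n = ql then 1000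
  else if PySem.Str.startswith n ql then 900
  else if PySem.Str.isIn ql n then 500
  else 0

-- str(it.get(key, "")) : values are strings, so str(...) is the identity
def filter_sort_py (items : List (List (String × String))) (key : String) (q : String) : List (List (String × String)) :=
  if q = "" then items
  else
    let scored := items.foldl
      (fun (acc : List (Int × String × List (String × String))) it =>
        let name := PySem.Dict.getD (PySem.Dict.mk it) key ""
        let s := scorePy name q
        if s > 0 then acc ++ [(s, name, it)] else acc) []
    (PySem.List.sorted2 scored (fun t => -t.1) (fun t => t.2.1) false).map (fun t => t.2.2)

-- ===== PORT B =====
def filter_sort_py_alt (items : List (List (String × String))) (key : String) (q : String) : List (List (String × String)) :=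
  if q = "" then items
  else
    let ql := PySem.Str.lower q
    let buckets := items.foldl
      (fun (acc : List (String × List (String × String)) × List (String × List (String × String)) × List (String × List (String × String))) it =>
        let name := PySem.Dict.getD (PySem.Dict.mk it) key ""
        let n := PySem.Str.lower name
        if n = ql then (acc.1 ++ [(name, it)], acc.2.1, acc.2.2)
        else if PySem.Str.startswith n ql then (acc.1, acc.2.1 ++ [(name, it)], acc.2.2)
        else if PySem.Str.isIn ql n then (acc.1, acc.2.1, acc.2.2 ++ [(name, it)])
        else acc) ([], [], [])
    [buckets.1, buckets.2.1, buckets.2.2].foldl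
      (fun out b => out ++ (PySem.List.sorted b (fun t => t.1) false).map (fun t => t.2)) []

-- ===== PRECONDITION & SPEC =====
def Spec_filter_sort_py (items : List (List (String × String))) (key : String) (q : String) (out : List (List (String × String))) : Prop := out = filter_sort_py_alt items key q
instance (items : List (List (String × String))) (key : String) (q : String) (out : List (List (String × String))) : Decidable (Spec_filter_sort_py items key q out) := by unfold Spec_filter_sort_py; infer_instance

-- ===== CLAIM (what is proved, stated in full; the proofs are below) =====
def Claim_equal_filter_sort_py : Prop := ∀ (items : List (List (String × String))) (key : String) (q : String), Dom_filter_sort_py items key q → Spec_filter_sort_py items key q (filter_sort_py items key q)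

-- ===== LEMMAS AND PROOFS =====

-- insertBy facts
theorem insertBy_append_of_all_before {α : Type} (p : α → α → Bool) (x : α) (ys zs : List α)
    (h : ∀ z ∈ zs, p x z = true) :
    PySem.List.insertBy p x (ys ++ zs) = PySem.List.insertBy p x ys ++ zs := by
  induction ys with
  | nil =>
    cases zs with
    | nil => simp [PySem.List.insertBy]
    | cons z zs' => simp [PySem.List.insertBy, h z (by simp)]
  | cons y ys ih =>
    by_cases hxy : p x y
    · simp [PySem.List.insertBy, hxy]
    · simp [PySem.List.insertBy, hxy, ih]

theorem insertBy_append_of_all_not_before {α : Type} (p : α → α → Bool) (x : α) (ys zs : List α)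
    (h : ∀ y ∈ ys, p x y = false) :
    PySem.List.insertBy p x (ys ++ zs) = ys ++ PySem.List.insertBy p x zs := by
  induction ys with
  | nil => simp
  | cons y ys ih =>
    have hy := h y (by simp)
    simp only [List.cons_append, PySem.List.insertBy, hy]
    simp [ih (fun y hy' => h y (by simp [hy']))]

theorem insertBy_congr_mem {α : Type} (p q : α → α → Bool) (x : α) (ys : List α)
    (h : ∀ y ∈ ys, p x y = q x y) :
    PySem.List.insertBy p x ys = PySem.List.insertBy q x ys := by
  induction ys with
  | nil => rfl
  | cons y ys ih =>
    have hy := h y (by simp)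
    simp only [PySem.List.insertBy, hy]
    by_cases hq : q x y
    · simp [hq]
    · simp [hq, ih (fun y hy' => h y (by simp [hy']))]

theorem insertBy_map {α β : Type} (p : β → β → Bool) (p' : α → α → Bool) (f : α → β) (x : α) (l : List α)
    (h : ∀ a b : α, p (f a) (f b) = p' a b) :
    PySem.List.insertBy p (f x) (l.map f) = (PySem.List.insertBy p' x l).map f := by
  induction l with
  | nil => rfl
  | cons a l ih =>
    simp only [List.map_cons, PySem.List.insertBy, h x a]
    by_cases hq : p' x a
    · simp [hq]
    · simp [hq, ih]

theorem sorted_append_singleton {α κ : Type} [LinearOrder κ] (key : α → κ) (l : List α) (x : α) :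
    PySem.List.sorted (l ++ [x]) key false
      = PySem.List.insertBy (fun a b => decide (key a < key b)) x (PySem.List.sorted l key false) := by
  rw [PySem.List.sorted_eq_foldl_insertBy, PySem.List.sorted_eq_foldl_insertBy, List.foldl_append]
  rfl

-- sorted of a mapped list, when the key factors through the map
theorem sorted_map {α β κ : Type} [LinearOrder κ] (f : α → β) (key : β → κ) (l : List α) :
    PySem.List.sorted (l.map f) key false = (PySem.List.sorted l (fun x => key (f x)) false).map f := by
  induction l using List.reverseRecOn with
  | nil => simp [PySem.List.sorted]
  | append_singleton l x ih =>
    rw [List.map_append, List.map_singleton, sorted_append_singleton, sorted_append_singleton, ih]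
    exact insertBy_map _ _ f x _ (fun a b => rfl)

-- the lexicographic 'before' used by sorted2 on the key (-score, name)
def befA {α : Type} (a b : Int × String × α) : Bool :=
  decide ((-a.1) < (-b.1)) || (!decide ((-b.1) < (-a.1)) && decide (a.2.1 < b.2.1))

def befN {α : Type} (a b : Int × String × α) : Bool := decide (a.2.1 < b.2.1)

theorem sorted2_eq_foldl {α : Type} (l : List (Int × String × α)) :
    PySem.List.sorted2 l (fun t => -t.1) (fun t => t.2.1) false
      = l.foldl (fun acc x => PySem.List.insertBy befA x acc) [] := by
  rfl

-- MAIN: a stable sort by (-score, name) with scores in {1000, 900, 500} is the concatenation of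
-- the three score classes, each stably sorted by name
theorem sorted2_split {α : Type} (l : List (Int × String × α))
    (h : ∀ t ∈ l, t.1 = 1000 ∨ t.1 = 900 ∨ t.1 = 500) :
    PySem.List.sorted2 l (fun t => -t.1) (fun t => t.2.1) false =
      PySem.List.sorted (l.filter (fun t => t.1 == 1000)) (fun t => t.2.1) false ++
      PySem.List.sorted (l.filter (fun t => t.1 == 900)) (fun t => t.2.1) false ++
      PySem.List.sorted (l.filter (fun t => t.1 == 500)) (fun t => t.2.1) false := by
  induction l using List.reverseRecOn with
  | nil => simp [sorted2_eq_foldl, PySem.List.sorted]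
  | append_singleton l x ih =>
    have hx := h x (by simp)
    have hl : ∀ t ∈ l, t.1 = 1000 ∨ t.1 = 900 ∨ t.1 = 500 := fun t ht => h t (by simp [ht])
    have hS1 : ∀ y ∈ PySem.List.sorted (l.filter (fun t => t.1 == 1000)) (fun t : ℤ × String × α => t.2.1) false, y.1 = (1000 : ℤ) := by
      intro y hy
      have := List.of_mem_filter ((PySem.List.mem_sorted _ _ _ _).1 hy)
      simpa using this
    have hS2 : ∀ y ∈ PySem.List.sorted (l.filter (fun t => t.1 == 900)) (fun t : ℤ × String × α => t.2.1) false, y.1 = (900 : ℤ) := by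
      intro y hy
      have := List.of_mem_filter ((PySem.List.mem_sorted _ _ _ _).1 hy)
      simpa using this
    have hS3 : ∀ y ∈ PySem.List.sorted (l.filter (fun t => t.1 == 500)) (fun t : ℤ × String × α => t.2.1) false, y.1 = (500 : ℤ) := by
      intro y hy
      have := List.of_mem_filter ((PySem.List.mem_sorted _ _ _ _).1 hy)
      simpa using this
    rw [sorted2_eq_foldl, List.foldl_append]
    simp only [List.foldl_cons, List.foldl_nil]
    rw [← sorted2_eq_foldl, ih hl]
    rw [List.filter_append, List.filter_append, List.filter_append]
    rcases hx with hx | hx | hx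
    · -- x goes into bucket 1
      have hf1 : List.filter (fun t : ℤ × String × α => t.1 == 1000) [x] = [x] := by simp [hx]
      have hf2 : List.filter (fun t : ℤ × String × α => t.1 == 900) [x] = [] := by simp [hx]
      have hf3 : List.filter (fun t : ℤ × String × α => t.1 == 500) [x] = [] := by simp [hx]
      rw [hf1, hf2, hf3, List.append_nil, List.append_nil, sorted_append_singleton]
      rw [List.append_assoc]
      rw [insertBy_append_of_all_before _ _ _ _ (by
        intro z hz
        rcases List.mem_append.1 hz with hz | hz
        · have := hS2 z hz; simp [befA, hx, this]
        · have := hS3 z hz; simp [befA, hx, this])]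
      rw [insertBy_congr_mem befA (fun a b => decide (a.2.1 < b.2.1)) x _ (by
        intro y hy
        have := hS1 y hy
        simp [befA, hx, this])]
      rw [List.append_assoc]
    · -- x goes into bucket 2
      have hf1 : List.filter (fun t : ℤ × String × α => t.1 == 1000) [x] = [] := by simp [hx]
      have hf2 : List.filter (fun t : ℤ × String × α => t.1 == 900) [x] = [x] := by simp [hx]
      have hf3 : List.filter (fun t : ℤ × String × α => t.1 == 500) [x] = [] := by simp [hx]
      rw [hf1, hf2, hf3, List.append_nil, List.append_nil, sorted_append_singleton]
      rw [List.append_assoc]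
      rw [insertBy_append_of_all_not_before _ _ _ _ (by
        intro y hy
        have := hS1 y hy; simp [befA, hx, this])]
      rw [insertBy_append_of_all_before _ _ _ _ (by
        intro z hz
        have := hS3 z hz; simp [befA, hx, this])]
      rw [insertBy_congr_mem befA (fun a b => decide (a.2.1 < b.2.1)) x _ (by
        intro y hy
        have := hS2 y hy
        simp [befA, hx, this])]
      rw [List.append_assoc]
    · -- x goes into bucket 3
      have hf1 : List.filter (fun t : ℤ × String × α => t.1 == 1000) [x] = [] := by simp [hx]
      have hf2 : List.filter (fun t : ℤ × String × α => t.1 == 900) [x] = [] := by simp [hx]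
      have hf3 : List.filter (fun t : ℤ × String × α => t.1 == 500) [x] = [x] := by simp [hx]
      rw [hf1, hf2, hf3, List.append_nil, List.append_nil, sorted_append_singleton]
      rw [List.append_assoc]
      rw [insertBy_append_of_all_not_before _ _ _ _ (by
        intro y hy
        have := hS1 y hy; simp [befA, hx, this])]
      rw [insertBy_append_of_all_not_before _ _ _ _ (by
        intro y hy
        have := hS2 y hy; simp [befA, hx, this])]
      rw [insertBy_congr_mem befA (fun a b => decide (a.2.1 < b.2.1)) x _ (by
        intro y hy
        have := hS3 y hy
        simp [befA, hx, this])]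
      rw [List.append_assoc]

-- A's scoring loop builds filter + map
theorem scored_eq (items : List (List (String × String))) (key q : String)
    (acc : List (Int × String × List (String × String))) :
    items.foldl
      (fun acc it =>
        let name := PySem.Dict.getD (PySem.Dict.mk it) key ""
        let s := scorePy name q
        if s > 0 then acc ++ [(s, name, it)] else acc) acc
    = acc ++ (items.filter (fun it => decide (scorePy (PySem.Dict.getD (PySem.Dict.mk it) key "") q > 0))).map
        (fun it => (scorePy (PySem.Dict.getD (PySem.Dict.mk it) key "") q, PySem.Dict.getD (PySem.Dict.mk it) key "", it)) := by
  induction items generalizing acc with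
  | nil => simp
  | cons it tl ih =>
    simp only [List.foldl_cons]
    by_cases hs : scorePy (PySem.Dict.getD (PySem.Dict.mk it) key "") q > 0
    · rw [if_pos hs, ih]
      simp [hs]
    · rw [if_neg hs, ih]
      simp [hs]

-- B's bucket conditions
def bC1 (key ql : String) (it : List (String × String)) : Bool :=
  PySem.Str.lower (PySem.Dict.getD (PySem.Dict.mk it) key "") == ql
def bC2 (key ql : String) (it : List (String × String)) : Bool :=
  !bC1 key ql it && PySem.Str.startswith (PySem.Str.lower (PySem.Dict.getD (PySem.Dict.mk it) key "")) ql
def bC3 (key ql : String) (it : List (String × String)) : Bool :=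
  !bC1 key ql it && !PySem.Str.startswith (PySem.Str.lower (PySem.Dict.getD (PySem.Dict.mk it) key "")) ql
    && PySem.Str.isIn ql (PySem.Str.lower (PySem.Dict.getD (PySem.Dict.mk it) key ""))

-- B's bucket loop builds three filter + maps
theorem buckets_eq (items : List (List (String × String))) (key ql : String)
    (a b c : List (String × List (String × String))) :
    items.foldl
      (fun (acc : List (String × List (String × String)) × List (String × List (String × String)) × List (String × List (String × String))) it =>
        let name := PySem.Dict.getD (PySem.Dict.mk it) key ""
        let n := PySem.Str.lower name
        if n = ql then (acc.1 ++ [(name, it)], acc.2.1, acc.2.2)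
        else if PySem.Str.startswith n ql then (acc.1, acc.2.1 ++ [(name, it)], acc.2.2)
        else if PySem.Str.isIn ql n then (acc.1, acc.2.1, acc.2.2 ++ [(name, it)])
        else acc) (a, b, c)
    = (a ++ (items.filter (bC1 key ql)).map (fun it => (PySem.Dict.getD (PySem.Dict.mk it) key "", it)),
       b ++ (items.filter (bC2 key ql)).map (fun it => (PySem.Dict.getD (PySem.Dict.mk it) key "", it)),
       c ++ (items.filter (bC3 key ql)).map (fun it => (PySem.Dict.getD (PySem.Dict.mk it) key "", it))) := by
  induction items generalizing a b c with
  | nil => simp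
  | cons it tl ih =>
    simp only [List.foldl_cons]
    by_cases h1 : PySem.Str.lower (PySem.Dict.getD (PySem.Dict.mk it) key "") = ql
    · have b1 : bC1 key ql it = true := by simp only [bC1, beq_iff_eq]; exact h1
      have b2 : bC2 key ql it = false := by simp only [bC2, b1, Bool.not_true, Bool.false_and]
      have b3 : bC3 key ql it = false := by simp only [bC3, b1, Bool.not_true, Bool.false_and]
      rw [if_pos h1, ih]
      simp [b1, b2, b3]
    · have b1 : bC1 key ql it = false := beq_eq_false_iff_ne.mpr h1
      rw [if_neg h1]
      by_cases h2 : PySem.Str.startswith (PySem.Str.lower (PySem.Dict.getD (PySem.Dict.mk it) key "")) ql = true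
      · have b2 : bC2 key ql it = true := by
          simp only [bC2, b1, Bool.not_false, Bool.true_and]; exact h2
        have b3 : bC3 key ql it = false := by
          simp only [bC3, b1, Bool.not_false, Bool.true_and, h2, Bool.not_true, Bool.false_and]
        rw [if_pos h2, ih]
        simp [b1, b2, b3]
      · have h2f : PySem.Str.startswith (PySem.Str.lower (PySem.Dict.getD (PySem.Dict.mk it) key "")) ql = false :=
          Bool.eq_false_iff.mpr h2
        have b2 : bC2 key ql it = false := by
          simp only [bC2, b1, Bool.not_false, Bool.true_and]; exact h2f
        rw [if_neg h2]
        by_cases h3 : PySem.Str.isIn ql (PySem.Str.lower (PySem.Dict.getD (PySem.Dict.mk it) key "")) = true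
        · have b3 : bC3 key ql it = true := by
            simp only [bC3, b1, Bool.not_false, Bool.true_and, h2f, Bool.not_false]; exact h3
          rw [if_pos h3, ih]
          simp [b1, b2, b3]
        · have h3f : PySem.Str.isIn ql (PySem.Str.lower (PySem.Dict.getD (PySem.Dict.mk it) key "")) = false :=
            Bool.eq_false_iff.mpr h3
          have b3 : bC3 key ql it = false := by
            simp only [bC3, b1, Bool.not_false, Bool.true_and, h2f, Bool.not_false, h3f, Bool.and_false]
          rw [if_neg h3, ih]
          simp [b1, b2, b3]

theorem lower_ne_empty (q : String) (hq : q ≠ "") : PySem.Str.lower q ≠ "" := by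
  intro hcontra
  apply hq
  have h1 : (PySem.Str.lower q).toList = [] := by rw [hcontra]; simp
  rw [PySem.Str.toList_lower] at h1
  rw [← String.toList_eq_nil_iff]
  cases hql : q.toList with
  | nil => rfl
  | cons c cs => rw [hql] at h1; simp [PySem.Chars.lower] at h1

theorem scorePy_eq (name q : String) :
    scorePy name q =
      (if PySem.Str.lower q = "" then 0
       else if PySem.Str.lower name = PySem.Str.lower q then 1000
       else if PySem.Str.startswith (PySem.Str.lower name) (PySem.Str.lower q) then 900
       else if PySem.Str.isIn (PySem.Str.lower q) (PySem.Str.lower name) then 500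
       else 0) := rfl

theorem score_cond_1000 (key q : String) (hq : q ≠ "") (it : List (String × String)) :
    ((scorePy (PySem.Dict.getD (PySem.Dict.mk it) key "") q == (1000 : ℤ))
      && decide (scorePy (PySem.Dict.getD (PySem.Dict.mk it) key "") q > 0)) = bC1 key (PySem.Str.lower q) it := by
  have hql := lower_ne_empty q hq
  rw [scorePy_eq, if_neg hql]
  simp only [bC1]
  by_cases h1 : PySem.Str.lower (PySem.Dict.getD (PySem.Dict.mk it) key "") = PySem.Str.lower q
  · rw [if_pos h1, beq_iff_eq.mpr h1]; decide
  · rw [if_neg h1, beq_eq_false_iff_ne.mpr h1]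
    by_cases h2 : PySem.Str.startswith (PySem.Str.lower (PySem.Dict.getD (PySem.Dict.mk it) key "")) (PySem.Str.lower q) = true
    · rw [if_pos h2]; decide
    · rw [if_neg h2]
      by_cases h3 : PySem.Str.isIn (PySem.Str.lower q) (PySem.Str.lower (PySem.Dict.getD (PySem.Dict.mk it) key "")) = true
      · rw [if_pos h3]; decide
      · rw [if_neg h3]; decide

theorem score_cond_900 (key q : String) (hq : q ≠ "") (it : List (String × String)) :
    ((scorePy (PySem.Dict.getD (PySem.Dict.mk it) key "") q == (900 : ℤ))
      && decide (scorePy (PySem.Dict.getD (PySem.Dict.mk it) key "") q > 0)) = bC2 key (PySem.Str.lower q) it := by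
  have hql := lower_ne_empty q hq
  rw [scorePy_eq, if_neg hql]
  simp only [bC2, bC1]
  by_cases h1 : PySem.Str.lower (PySem.Dict.getD (PySem.Dict.mk it) key "") = PySem.Str.lower q
  · rw [if_pos h1, beq_iff_eq.mpr h1]; simp
  · rw [if_neg h1, beq_eq_false_iff_ne.mpr h1]
    by_cases h2 : PySem.Str.startswith (PySem.Str.lower (PySem.Dict.getD (PySem.Dict.mk it) key "")) (PySem.Str.lower q) = true
    · rw [if_pos h2, h2]; decide
    · have h2f := Bool.eq_false_iff.mpr h2
      rw [if_neg h2, h2f]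
      by_cases h3 : PySem.Str.isIn (PySem.Str.lower q) (PySem.Str.lower (PySem.Dict.getD (PySem.Dict.mk it) key "")) = true
      · rw [if_pos h3]; decide
      · rw [if_neg h3]; decide

theorem score_cond_500 (key q : String) (hq : q ≠ "") (it : List (String × String)) :
    ((scorePy (PySem.Dict.getD (PySem.Dict.mk it) key "") q == (500 : ℤ))
      && decide (scorePy (PySem.Dict.getD (PySem.Dict.mk it) key "") q > 0)) = bC3 key (PySem.Str.lower q) it := by
  have hql := lower_ne_empty q hq
  rw [scorePy_eq, if_neg hql]
  simp only [bC3, bC1]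
  by_cases h1 : PySem.Str.lower (PySem.Dict.getD (PySem.Dict.mk it) key "") = PySem.Str.lower q
  · rw [if_pos h1, beq_iff_eq.mpr h1]; simp
  · rw [if_neg h1, beq_eq_false_iff_ne.mpr h1]
    by_cases h2 : PySem.Str.startswith (PySem.Str.lower (PySem.Dict.getD (PySem.Dict.mk it) key "")) (PySem.Str.lower q) = true
    · rw [if_pos h2, h2]; simp
    · have h2f := Bool.eq_false_iff.mpr h2
      rw [if_neg h2, h2f]
      by_cases h3 : PySem.Str.isIn (PySem.Str.lower q) (PySem.Str.lower (PySem.Dict.getD (PySem.Dict.mk it) key "")) = true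
      · rw [if_pos h3, h3]; decide
      · have h3f := Bool.eq_false_iff.mpr h3
        rw [if_neg h3, h3f]; decide

-- ===== VERDICT (by name: the statement is the Claim_ definition above) =====
theorem filter_sort_py_spec : Claim_equal_filter_sort_py := by
  intro items key q _
  unfold Spec_filter_sort_py
  by_cases hq : q = ""
  · simp [filter_sort_py, filter_sort_py_alt, hq]
  · unfold filter_sort_py filter_sort_py_alt
    rw [if_neg hq, if_neg hq]
    try dsimp only
    rw [scored_eq, buckets_eq]
    simp only [List.nil_append]
    rw [sorted2_split _ (by
      intro t ht
      simp only [List.mem_map, List.mem_filter] at ht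
      obtain ⟨it, ⟨_, hpos⟩, rfl⟩ := ht
      have hscore : scorePy (PySem.Dict.getD (PySem.Dict.mk it) key "") q = 1000 ∨
          scorePy (PySem.Dict.getD (PySem.Dict.mk it) key "") q = 900 ∨
          scorePy (PySem.Dict.getD (PySem.Dict.mk it) key "") q = 500 ∨
          scorePy (PySem.Dict.getD (PySem.Dict.mk it) key "") q = 0 := by
        rw [scorePy_eq]; split_ifs <;> simp
      have hpos' : scorePy (PySem.Dict.getD (PySem.Dict.mk it) key "") q > 0 := by simpa using hpos
      rcases hscore with h | h | h | h
      · left; simpa using h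
      · right; left; simpa using h
      · right; right; simpa using h
      · exact absurd hpos' (by simp [h]))]
    rw [List.filter_map, List.filter_map, List.filter_map]
    rw [List.filter_filter, List.filter_filter, List.filter_filter]
    simp only [Function.comp_apply]
    rw [List.filter_congr (fun it _ => score_cond_1000 key q hq it),
        List.filter_congr (fun it _ => score_cond_900 key q hq it),
        List.filter_congr (fun it _ => score_cond_500 key q hq it)]
    simp only [sorted_map]
    try dsimp only
    simp [List.map_map, List.foldl_cons]
    rw [sorted_map, sorted_map, sorted_map]
    simp [Function.comp_def]
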